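-- pv_equiv track=rewrite | github.com/kmonguu/Algorithm | Python/Programmers/codingTest/Level 1/두 개 뽑아서 더하기.py | solution
-- ===== SOURCE A (Python) =====
-- def solution(numbers):
--     def dfs(case, pick, idx, depth):
--         if depth == pick:
--             answer.add(case)
--             return
--
--         for i in range(idx, len(numbers)):
--             dfs(case + numbers[i], pick, i + 1, depth + 1)
--
--     answer = set()
--     dfs(0, 2, 0, 0)
--     return sorted(answer)
-- ===== SOURCE B (Python) =====
-- def solution(numbers):
--     sums = set()
--     n = len(numbers)
--     for i in range(n):
--         for j in range(i + 1, n):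
--             sums.add(numbers[i] + numbers[j])
--     return sorted(sums)
-- ===== Notes on version B (the rewrite author's own statement) =====
-- stated objective: simpler
-- what changed: Replaced A's generic depth-limited recursive DFS pick-2 enumerator with a direct iterative double loop over index pairs i<j accumulating sums into a set.
import Mathlib
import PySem

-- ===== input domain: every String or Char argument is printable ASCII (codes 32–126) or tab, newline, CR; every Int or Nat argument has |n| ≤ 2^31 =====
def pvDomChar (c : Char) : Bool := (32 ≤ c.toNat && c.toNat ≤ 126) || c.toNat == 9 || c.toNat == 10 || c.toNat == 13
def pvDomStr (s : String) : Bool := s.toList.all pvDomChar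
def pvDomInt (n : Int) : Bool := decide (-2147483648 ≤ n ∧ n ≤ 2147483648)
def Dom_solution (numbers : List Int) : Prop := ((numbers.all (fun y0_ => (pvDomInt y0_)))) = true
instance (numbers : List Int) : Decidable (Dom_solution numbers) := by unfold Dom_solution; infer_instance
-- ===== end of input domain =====

-- B replaces A's recursive depth-limited DFS pick-2 enumerator by a plain iterative
-- double loop over index pairs i < j (objective: simpler); same set, same sorted output.

-- ===== PORT A =====
-- dfs(case, pick, idx, depth); numbers[i] is always in range here, so pyGetD with
-- default 0 is exact on every index the program reads.
def dfsA (numbers : List Int) (case : Int) (pick : Nat) (idx : Nat) (depth : Nat)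
    (answer : PySem.Set Int) : PySem.Set Int :=
  if depth = pick then PySem.Set.add answer case
  else
    (PySem.List.pyRange (idx : Int) (numbers.length : Int) 1).attach.foldl
      (fun acc i =>
        dfsA numbers (case + PySem.List.pyGetD numbers i.1 0) pick (i.1 + 1).toNat (depth + 1) acc)
      answer
termination_by numbers.length - idx
decreasing_by
  have h := (PySem.List.mem_pyRange_one).1 i.2
  omega

def solution (numbers : List Int) : List Int :=
  PySem.List.sorted (dfsA numbers 0 2 0 0 PySem.Set.empty) (fun x => x) false

-- ===== PORT B =====
def solution_alt (numbers : List Int) : List Int :=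
  let n : Int := numbers.length
  let sums : PySem.Set Int :=
    (PySem.List.pyRange 0 n 1).foldl
      (fun s i =>
        (PySem.List.pyRange (i + 1) n 1).foldl
          (fun s2 j =>
            PySem.Set.add s2 (PySem.List.pyGetD numbers i 0 + PySem.List.pyGetD numbers j 0)) s)
      PySem.Set.empty
  PySem.List.sorted sums (fun x => x) false

-- ===== PRECONDITION & SPEC =====
def Spec_solution (numbers : List Int) (out : List Int) : Prop := out = solution_alt numbers
instance (numbers : List Int) (out : List Int) : Decidable (Spec_solution numbers out) := by unfold Spec_solution; infer_instance

-- ===== CLAIM (what is proved, stated in full; the proofs are below) =====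
def Claim_equal_solution : Prop := ∀ (numbers : List Int), Dom_solution numbers → Spec_solution numbers (solution numbers)

-- ===== LEMMAS AND PROOFS =====

lemma dfsA_depth_eq_pick (numbers : List Int) (c : Int) (p idx : Nat) (ans : PySem.Set Int) :
    dfsA numbers c p idx p ans = PySem.Set.add ans c := by
  rw [dfsA]; simp

lemma dfsA_depth1 (numbers : List Int) (c : Int) (idx : Nat) (ans : PySem.Set Int) :
    dfsA numbers c 2 idx 1 ans =
      (PySem.List.pyRange (idx : Int) (numbers.length : Int) 1).foldl
        (fun acc j => PySem.Set.add acc (c + PySem.List.pyGetD numbers j 0)) ans := by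
  rw [dfsA, if_neg (by omega)]
  simp only [List.foldl_subtype, List.unattach_attach]
  exact PySem.List.foldl_congr_mem _ _ _ _ (fun acc j _ => dfsA_depth_eq_pick ..)

lemma dfsA_depth0 (numbers : List Int) (c : Int) (idx : Nat) (ans : PySem.Set Int) :
    dfsA numbers c 2 idx 0 ans =
      (PySem.List.pyRange (idx : Int) (numbers.length : Int) 1).foldl
        (fun acc i =>
          (PySem.List.pyRange (i + 1) (numbers.length : Int) 1).foldl
            (fun acc2 j =>
              PySem.Set.add acc2 (c + PySem.List.pyGetD numbers i 0 + PySem.List.pyGetD numbers j 0))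
            acc)
        ans := by
  rw [dfsA, if_neg (by omega)]
  simp only [List.foldl_subtype, List.unattach_attach]
  refine PySem.List.foldl_congr_mem _ _ _ _ (fun acc i hi => ?_)
  have h := (PySem.List.mem_pyRange_one).1 hi
  rw [dfsA_depth1]
  have hcast : (((i + 1).toNat : Int)) = i + 1 := by omega
  rw [hcast]

-- ===== VERDICT (by name: the statement is the Claim_ definition above) =====
theorem solution_spec : Claim_equal_solution := by
  intro numbers _
  unfold Spec_solution solution solution_alt
  rw [dfsA_depth0]
  congr 1
  refine PySem.List.foldl_congr_mem _ _ _ _ (fun acc i hi => ?_)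
  refine PySem.List.foldl_congr_mem _ _ _ _ (fun acc2 j _ => ?_)
  rw [zero_add]
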